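-- pv_equiv track=rewrite | github.com/dawsonblock/RFSN_NPC_CONTROLLER | Python/multi_npc.py | _summarize_turns
-- ===== SOURCE A (Python) =====
-- from typing import Dict, List, Optional, Any, Callable
--
-- def _summarize_turns(turns: List[Dict[str, str]], npc_name: str) -> str:
--     """
--     Create a simple summary of conversation turns.
--
--     For production, consider using an LLM for summarization.
--     """
--     topics = set()
--
--     for turn in turns:
--         # Extract key topics from user input
--         words = turn['user_input'].lower().split()
--
--         # Simple topic extraction
--         topic_words = {'quest', 'dragon', 'jarl', 'war', 'stormcloak', 'imperial',
--                       'thalmor', 'draugr', 'vampire', 'werewolf', 'guild', 'college',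
--                       'companions', 'thieves', 'assassin', 'daedric', 'artifact',
--                       'weapon', 'armor', 'magic', 'shout', 'word', 'wall'}
--
--         for word in words:
--             if word in topic_words:
--                 topics.add(word)
--
--     if topics:
--         return f"Discussed: {', '.join(sorted(topics))}. {len(turns)} previous exchanges."
--     else:
--         return f"{len(turns)} previous exchanges with {npc_name}."
-- ===== SOURCE B (Python) =====
-- from typing import Dict, List
--
-- # The topic keywords in alphabetical order; iterating this tuple yields the
-- # topics already sorted, so no runtime sort is needed.
-- _SORTED_TOPICS = ('armor', 'artifact', 'assassin', 'college', 'companions',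
--                   'daedric', 'dragon', 'draugr', 'guild', 'imperial', 'jarl',
--                   'magic', 'quest', 'shout', 'stormcloak', 'thalmor', 'thieves',
--                   'vampire', 'wall', 'war', 'weapon', 'werewolf', 'word')
--
--
-- def _summarize_turns(turns: List[Dict[str, str]], npc_name: str) -> str:
--     all_words = set()
--     for turn in turns:
--         all_words.update(turn['user_input'].lower().split())
--     topics = [t for t in _SORTED_TOPICS if t in all_words]
--     if topics:
--         return f"Discussed: {', '.join(topics)}. {len(turns)} previous exchanges."
--     return f"{len(turns)} previous exchanges with {npc_name}."
-- ===== Notes on version B (the rewrite author's own statement) =====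
-- stated objective: alternative
-- what changed: B inverts the traversal: it collects the universe of lowercased tokens once, then iterates the FIXED alphabetically-ordered keyword tuple and keeps each keyword present in that universe, so the per-word keyword test and the runtime sort both disappear (the output order comes from the constant tuple).
import Mathlib
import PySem

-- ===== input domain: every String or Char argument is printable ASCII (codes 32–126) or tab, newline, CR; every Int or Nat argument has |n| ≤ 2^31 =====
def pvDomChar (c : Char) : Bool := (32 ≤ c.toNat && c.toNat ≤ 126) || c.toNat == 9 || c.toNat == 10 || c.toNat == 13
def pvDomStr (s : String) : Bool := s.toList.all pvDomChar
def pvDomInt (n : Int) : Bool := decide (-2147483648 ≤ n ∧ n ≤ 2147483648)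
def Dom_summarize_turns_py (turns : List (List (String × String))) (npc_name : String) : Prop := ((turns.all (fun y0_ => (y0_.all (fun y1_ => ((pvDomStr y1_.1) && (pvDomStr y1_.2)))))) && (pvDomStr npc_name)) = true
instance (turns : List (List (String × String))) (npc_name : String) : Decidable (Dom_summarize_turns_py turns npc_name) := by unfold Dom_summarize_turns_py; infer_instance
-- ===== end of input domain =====

-- B inverts the traversal: it collects the token universe once, then filters the FIXED
-- alphabetically-ordered keyword tuple by presence in it, so the per-word keyword branch
-- and the runtime sort disappear (objective: alternative).

-- ===== PORT A =====
-- the words of one turn: turn['user_input'].lower().split() (getD is total; Pre_ guarantees the key exists)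
def pvWordsOf (turn : List (String × String)) : List String :=
  PySem.Str.split₀ (PySem.Str.lower ((PySem.Dict.mk turn).getD "user_input" ""))

def summarize_turns_py (turns : List (List (String × String))) (npc_name : String) : String :=
  let topics : PySem.Set String :=
    turns.foldl (fun topics turn =>
      let words := pvWordsOf turn
      let topic_words : PySem.Set String :=
        PySem.Set.ofList ["quest", "dragon", "jarl", "war", "stormcloak", "imperial",
                          "thalmor", "draugr", "vampire", "werewolf", "guild", "college",
                          "companions", "thieves", "assassin", "daedric", "artifact",
                          "weapon", "armor", "magic", "shout", "word", "wall"]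
      words.foldl (fun t w => if PySem.Set.contains topic_words w then PySem.Set.add t w else t) topics)
      PySem.Set.empty
  if topics ≠ [] then
    "Discussed: " ++ PySem.Str.join ", " (PySem.List.sorted topics (fun x => x) false) ++ ". "
      ++ PySem.Int.toStr turns.length ++ " previous exchanges."
  else
    PySem.Int.toStr turns.length ++ " previous exchanges with " ++ npc_name ++ "."

-- ===== PORT B =====
-- the constant tuple _SORTED_TOPICS (alphabetical)
def pvSortedTopics : List String :=
  ["armor", "artifact", "assassin", "college", "companions",
   "daedric", "dragon", "draugr", "guild", "imperial", "jarl",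
   "magic", "quest", "shout", "stormcloak", "thalmor", "thieves",
   "vampire", "wall", "war", "weapon", "werewolf", "word"]

def summarize_turns_py_alt (turns : List (List (String × String))) (npc_name : String) : String :=
  let all_words : PySem.Set String :=
    turns.foldl (fun s turn => PySem.Set.update s (pvWordsOf turn)) PySem.Set.empty
  let topics := pvSortedTopics.filter (fun t => PySem.Set.contains all_words t)
  if topics ≠ [] then
    "Discussed: " ++ PySem.Str.join ", " topics ++ ". "
      ++ PySem.Int.toStr turns.length ++ " previous exchanges."
  else
    PySem.Int.toStr turns.length ++ " previous exchanges with " ++ npc_name ++ "."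

-- ===== PRECONDITION & SPEC =====
-- Pre_ excludes exactly the turns without a 'user_input' key, on which A raises KeyError.
def Pre_summarize_turns_py (turns : List (List (String × String))) (npc_name : String) : Prop :=
  turns.all (fun turn => (PySem.Dict.mk turn).contains "user_input") = true
instance (turns : List (List (String × String))) (npc_name : String) : Decidable (Pre_summarize_turns_py turns npc_name) := by unfold Pre_summarize_turns_py; infer_instance

def pvWitness_summarize_turns_py : (List (List (String × String))) × String :=
  ([[("user_input", "Tell me about the DRAGON")], [("user_input", "any quest for me?")]], "Lydia")

def Spec_summarize_turns_py (turns : List (List (String × String))) (npc_name : String) (out : String) : Prop := out = summarize_turns_py_alt turns npc_name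
instance (turns : List (List (String × String))) (npc_name : String) (out : String) : Decidable (Spec_summarize_turns_py turns npc_name out) := by unfold Spec_summarize_turns_py; infer_instance

-- ===== CLAIM (what is proved, stated in full; the proofs are below) =====
def Claim_equal_summarize_turns_py : Prop := ∀ (turns : List (List (String × String))) (npc_name : String), Dom_summarize_turns_py turns npc_name → Pre_summarize_turns_py turns npc_name → Spec_summarize_turns_py turns npc_name (summarize_turns_py turns npc_name)

-- ===== LEMMAS AND PROOFS =====

-- A's inner word loop: membership
theorem pvA_inner_mem (T : PySem.Set String) (ws : List String) (s : PySem.Set String) (y : String) :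
    y ∈ ws.foldl (fun t w => if PySem.Set.contains T w then PySem.Set.add t w else t) s ↔
      y ∈ s ∨ (y ∈ ws ∧ y ∈ T) := by
  induction ws generalizing s with
  | nil => simp
  | cons w ws ih =>
    simp only [List.foldl_cons, ih]
    by_cases hw : w ∈ T
    · rw [if_pos ((PySem.Set.contains_iff T w).mpr hw)]
      simp only [PySem.Set.mem_add, List.mem_cons]
      constructor
      · rintro ((h | rfl) | ⟨h1, h2⟩) <;> tauto
      · rintro (h | ⟨(rfl | h1), h2⟩) <;> tauto
    · rw [if_neg (fun h => hw ((PySem.Set.contains_iff T w).mp h))]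
      simp only [List.mem_cons]
      constructor
      · rintro (h | ⟨h1, h2⟩) <;> tauto
      · rintro (h | ⟨(rfl | h1), h2⟩) <;> tauto

-- A's inner word loop: preserves Nodup
theorem pvA_inner_nodup (T : PySem.Set String) (ws : List String) (s : PySem.Set String)
    (hs : s.Nodup) :
    (ws.foldl (fun t w => if PySem.Set.contains T w then PySem.Set.add t w else t) s).Nodup := by
  induction ws generalizing s with
  | nil => exact hs
  | cons w ws ih =>
    simp only [List.foldl_cons]
    apply ih
    split
    · exact PySem.Set.nodup_add _ _ hs
    · exact hs

-- A's outer loop: membership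
theorem pvA_mem (T : PySem.Set String) (turns : List (List (String × String)))
    (s : PySem.Set String) (y : String) :
    y ∈ turns.foldl (fun topics turn =>
        (pvWordsOf turn).foldl (fun t w => if PySem.Set.contains T w then PySem.Set.add t w else t) topics) s ↔
      y ∈ s ∨ ((∃ turn ∈ turns, y ∈ pvWordsOf turn) ∧ y ∈ T) := by
  induction turns generalizing s with
  | nil => simp
  | cons t ts ih =>
    simp only [List.foldl_cons, ih, pvA_inner_mem]
    constructor
    · rintro ((h | h) | h)
      · exact Or.inl h
      · exact Or.inr ⟨⟨t, by simp, h.1⟩, h.2⟩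
      · obtain ⟨⟨u, hu, hy⟩, hT⟩ := h
        exact Or.inr ⟨⟨u, by simp [hu], hy⟩, hT⟩
    · rintro (h | ⟨⟨u, hu, hy⟩, hT⟩)
      · exact Or.inl (Or.inl h)
      · rcases List.mem_cons.mp hu with rfl | hu
        · exact Or.inl (Or.inr ⟨hy, hT⟩)
        · exact Or.inr ⟨⟨u, hu, hy⟩, hT⟩

-- A's outer loop: Nodup
theorem pvA_nodup (T : PySem.Set String) (turns : List (List (String × String)))
    (s : PySem.Set String) (hs : s.Nodup) :
    (turns.foldl (fun topics turn =>
        (pvWordsOf turn).foldl (fun t w => if PySem.Set.contains T w then PySem.Set.add t w else t) topics) s).Nodup := by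
  induction turns generalizing s with
  | nil => exact hs
  | cons t ts ih => exact ih _ (pvA_inner_nodup T _ _ hs)

-- B's loop: membership
theorem pvB_mem (turns : List (List (String × String))) (s : PySem.Set String) (y : String) :
    y ∈ turns.foldl (fun s turn => PySem.Set.update s (pvWordsOf turn)) s ↔
      y ∈ s ∨ ∃ turn ∈ turns, y ∈ pvWordsOf turn := by
  induction turns generalizing s with
  | nil => simp
  | cons t ts ih =>
    simp only [List.foldl_cons, ih, PySem.Set.mem_update]
    constructor
    · rintro ((h | h) | ⟨u, hu, hy⟩)
      · exact Or.inl h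
      · exact Or.inr ⟨t, by simp, h⟩
      · exact Or.inr ⟨u, by simp [hu], hy⟩
    · rintro (h | ⟨u, hu, hy⟩)
      · exact Or.inl (Or.inl h)
      · rcases List.mem_cons.mp hu with rfl | hu
        · exact Or.inl (Or.inr hy)
        · exact Or.inr ⟨u, hu, hy⟩

-- the sorted keyword tuple has exactly the members of A's per-iteration set literal
theorem pvTopics_mem (y : String) :
    y ∈ pvSortedTopics ↔
      y ∈ (["quest", "dragon", "jarl", "war", "stormcloak", "imperial",
            "thalmor", "draugr", "vampire", "werewolf", "guild", "college",
            "companions", "thieves", "assassin", "daedric", "artifact",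
            "weapon", "armor", "magic", "shout", "word", "wall"] : List String) := by
  constructor <;> (intro h; fin_cases h <;> simp [pvSortedTopics])

theorem pvTopics_nodup : pvSortedTopics.Nodup := by decide

theorem pvTopics_sorted : pvSortedTopics.Pairwise (fun a b : String => a < b) := by
  have h : pvSortedTopics.Pairwise (fun a b : String => a.toList < b.toList) := by decide
  exact h.imp (fun hab => String.lt_iff_toList_lt.mpr hab)

-- ===== VERDICT (by name: the statement is the Claim_ definition above) =====
theorem summarize_turns_py_spec : Claim_equal_summarize_turns_py := by
  intro turns npc_name _ _
  unfold Spec_summarize_turns_py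
  simp only [summarize_turns_py, summarize_turns_py_alt]
  set T : PySem.Set String :=
    PySem.Set.ofList ["quest", "dragon", "jarl", "war", "stormcloak", "imperial",
                      "thalmor", "draugr", "vampire", "werewolf", "guild", "college",
                      "companions", "thieves", "assassin", "daedric", "artifact",
                      "weapon", "armor", "magic", "shout", "word", "wall"] with hT
  set A := turns.foldl (fun topics turn =>
      (pvWordsOf turn).foldl (fun t w => if PySem.Set.contains T w then PySem.Set.add t w else t) topics)
      PySem.Set.empty with hAdef
  set B := turns.foldl (fun s turn => PySem.Set.update s (pvWordsOf turn)) PySem.Set.empty with hBdef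
  set L := pvSortedTopics.filter (fun t => PySem.Set.contains B t) with hLdef
  have hmem : ∀ y, y ∈ L ↔ y ∈ A := by
    intro y
    rw [hLdef, List.mem_filter, hAdef, pvA_mem]
    simp only [PySem.Set.empty, List.not_mem_nil, false_or]
    rw [pvTopics_mem, ← PySem.Set.mem_ofList, ← hT]
    constructor
    · rintro ⟨hy, hb⟩
      have := (PySem.Set.contains_iff B y).mp hb
      rw [hBdef, pvB_mem] at this
      simp only [PySem.Set.empty, List.not_mem_nil, false_or] at this
      exact ⟨this, hy⟩
    · rintro ⟨hw, ht⟩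
      refine ⟨ht, (PySem.Set.contains_iff B y).mpr ?_⟩
      rw [hBdef, pvB_mem]
      exact Or.inr hw
  have hAnd : A.Nodup := pvA_nodup T turns PySem.Set.empty List.nodup_nil
  have hLnd : L.Nodup := pvTopics_nodup.filter _
  have hperm : L.Perm A := (List.perm_ext_iff_of_nodup hLnd hAnd).mpr hmem
  have hLsorted : L.Pairwise (fun a b : String => a < b) := pvTopics_sorted.filter _
  have hsorted : PySem.List.sorted A (fun x => x) false = L :=
    PySem.List.sorted_eq_of_perm_of_pairwise_lt A L (fun x => x) hperm hLsorted
  have hne : (A ≠ []) ↔ (L ≠ []) := by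
    rw [← hsorted]
    exact not_congr (PySem.List.sorted_eq_nil_iff _ _ _).symm
  split_ifs with h1 h2 h2
  · rw [hsorted]
  · exact absurd (hne.mp h1) h2
  · exact absurd (hne.mpr h2) h1
  · rfl
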